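-- pv_equiv track=rewrite | github.com/fabriziosalmi/crosswords | html_generator.py | _create_cell_numbers
-- ===== SOURCE A (Python) =====
-- from typing import List, Tuple, Dict
--
-- def _create_cell_numbers(
--     placed_words: List[Tuple[str, int, int, str]]
-- ) -> Dict[Tuple[int, int], int]:
--     """Creates mapping of cell positions to numbers."""
--     cell_numbers: Dict[Tuple[int, int], int] = {}
--     next_number = 1
--     for word, row, col, direction in placed_words:
--         if (row, col) not in cell_numbers:
--             cell_numbers[(row, col)] = next_number
--             next_number += 1
--     return cell_numbers
-- ===== SOURCE B (Python) =====
-- def _create_cell_numbers(placed_words):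
--     """Creates mapping of cell positions to numbers."""
--     cells = [(row, col) for word, row, col, direction in placed_words]
--     return {cell: len(set(cells[:i])) + 1
--             for i, cell in enumerate(cells)
--             if cell not in cells[:i]}
-- ===== Notes on version B (the rewrite author's own statement) =====
-- stated objective: alternative
-- what changed: Drops the dict-membership test and the running next_number counter entirely: B keeps only the cells whose prefix does not already contain them and computes each cell's number independently as the count of distinct cells in its prefix plus one (a stateless per-index formula over prefix slices instead of A's single stateful pass).
import Mathlib
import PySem

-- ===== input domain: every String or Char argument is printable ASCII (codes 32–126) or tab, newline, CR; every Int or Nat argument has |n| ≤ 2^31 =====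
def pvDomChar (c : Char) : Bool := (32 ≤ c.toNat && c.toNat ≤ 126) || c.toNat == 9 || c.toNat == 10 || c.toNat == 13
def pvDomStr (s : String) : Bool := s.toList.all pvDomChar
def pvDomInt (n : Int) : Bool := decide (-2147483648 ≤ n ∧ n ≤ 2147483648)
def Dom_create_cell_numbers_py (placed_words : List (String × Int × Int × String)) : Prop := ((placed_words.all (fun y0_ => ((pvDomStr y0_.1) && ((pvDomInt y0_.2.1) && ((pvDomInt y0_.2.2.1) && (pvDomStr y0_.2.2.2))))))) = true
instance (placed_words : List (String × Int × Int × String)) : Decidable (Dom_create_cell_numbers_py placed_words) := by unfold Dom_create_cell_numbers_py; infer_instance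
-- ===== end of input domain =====

-- B replaces A's stateful dict+counter loop by a stateless per-index formula: keep index i
-- iff cells[:i] lacks the cell, number it len(set(cells[:i]))+1 (alternative; not faster).


-- ===== PORT A =====
-- literal port of A: dict + running counter, insert on first sight of (row, col)
def create_cell_numbers_py (placed_words : List (String × Int × Int × String)) : List (Int × Int × Int) :=
  let st := placed_words.foldl
    (fun (st : PySem.Dict (Int × Int) Int × Int) y =>
      let row := y.2.1
      let col := y.2.2.1
      if st.1.contains (row, col) then st
      else (st.1.insert (row, col) st.2, st.2 + 1))
    (PySem.Dict.empty, 1)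
  st.1.items.map (fun p => (p.1.1, p.1.2, p.2))

-- ===== PORT B =====
-- literal port of Source B: cells = [(row, col) …]; then a dict comprehension keeping
-- index i only when cells[:i] does not already contain the cell, and numbering it
-- len(set(cells[:i])) + 1 — no dict membership state, no running counter
def create_cell_numbers_py_alt (placed_words : List (String × Int × Int × String)) : List (Int × Int × Int) :=
  let cells := placed_words.map (fun y => (y.2.1, y.2.2.1))
  ((PySem.List.enumerate cells 0).filter
      (fun p => !((PySem.List.slice cells none (some p.1)).contains p.2))).map
    (fun p => (p.2.1, p.2.2,
      ((PySem.Set.ofList (PySem.List.slice cells none (some p.1))).length : Int) + 1))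

-- ===== PRECONDITION & SPEC =====
def Spec_create_cell_numbers_py (placed_words : List (String × Int × Int × String)) (out : List (Int × Int × Int)) : Prop := out = create_cell_numbers_py_alt placed_words
instance (placed_words : List (String × Int × Int × String)) (out : List (Int × Int × Int)) : Decidable (Spec_create_cell_numbers_py placed_words out) := by unfold Spec_create_cell_numbers_py; infer_instance

-- ===== CLAIM (what is proved, stated in full; the proofs are below) =====
def Claim_equal_create_cell_numbers_py : Prop := ∀ (placed_words : List (String × Int × Int × String)), Dom_create_cell_numbers_py placed_words → Spec_create_cell_numbers_py placed_words (create_cell_numbers_py placed_words)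

-- ===== LEMMAS AND PROOFS =====

-- the cells of cs that are not yet in `seen`, first occurrences in order
def newCells : List (Int × Int) → List (Int × Int) → List (Int × Int)
  | [], _ => []
  | c :: cs, seen => if c ∈ seen then newCells cs seen else c :: newCells cs (c :: seen)

theorem newCells_congr (cs : List (Int × Int)) (s t : List (Int × Int))
    (h : ∀ x, x ∈ s ↔ x ∈ t) : newCells cs s = newCells cs t := by
  induction cs generalizing s t with
  | nil => rfl
  | cons c cs ih =>
    simp only [newCells]
    by_cases hc : c ∈ s
    · rw [if_pos hc, if_pos ((h c).1 hc)]; exact ih s t h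
    · rw [if_neg hc, if_neg (fun hct => hc ((h c).2 hct))]
      exact congrArg (c :: ·) (ih (c :: s) (c :: t) (by intro x; simp [h x]))

-- A's loop: the dict gains the enumerated first-sightings, the counter advances by their count
theorem loop_invariant (cs : List (Int × Int)) (d : PySem.Dict (Int × Int) Int) (n : Int) :
    cs.foldl
      (fun (st : PySem.Dict (Int × Int) Int × Int) c =>
        if st.1.contains c then st else (st.1.insert c st.2, st.2 + 1))
      (d, n)
    = (PySem.Dict.mk (d.items ++ (PySem.List.enumerate (newCells cs d.keys) n).map
        (fun p => (p.2, p.1))), n + (newCells cs d.keys).length) := by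
  induction cs generalizing d n with
  | nil => simp [newCells]
  | cons c cs ih =>
    simp only [List.foldl_cons, newCells]
    by_cases hc : c ∈ d.keys
    · have hcont : d.contains c = true := (PySem.Dict.contains_iff_mem_keys d c).2 hc
      rw [if_pos hc]
      simp only [hcont, if_true]
      exact ih d n
    · have hcont : d.contains c = false := by
        by_contra h
        exact hc ((PySem.Dict.contains_iff_mem_keys d c).1 (by simpa using Bool.of_not_eq_false h))
      rw [if_neg hc]
      simp only [hcont, Bool.false_eq_true, if_false]
      rw [ih]
      have hitems : (d.insert c n).items = d.items ++ [(c, n)] :=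
        PySem.Dict.items_insert_of_not_contains d n hcont
      have hkeys : (d.insert c n).keys = d.keys ++ [c] := by
        simp [PySem.Dict.keys, hitems]
      rw [hitems, hkeys,
        newCells_congr cs (d.keys ++ [c]) (c :: d.keys) (by intro x; simp; tauto)]
      simp [PySem.List.enumerate_cons]
      omega

-- B's comprehension: the prefix-slice tests reduce to enumerating the new cells,
-- with the accumulated prefix generalized
theorem alt_invariant (cs pre : List (Int × Int)) :
    ((PySem.List.enumerate cs (pre.length : Int)).filter
        (fun p => !((PySem.List.slice (pre ++ cs) none (some p.1)).contains p.2))).map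
      (fun p => (p.2.1, p.2.2,
        ((PySem.Set.ofList (PySem.List.slice (pre ++ cs) none (some p.1))).length : Int) + 1))
    = (PySem.List.enumerate (newCells cs (PySem.Set.ofList pre))
        (((PySem.Set.ofList pre).length : Int) + 1)).map
      (fun p => (p.2.1, p.2.2, p.1)) := by
  induction cs generalizing pre with
  | nil => simp [newCells]
  | cons c cs ih =>
    have hslice : PySem.List.slice (pre ++ c :: cs) none (some (pre.length : Int)) = pre := by
      rw [PySem.List.slice_to_natCast]
      exact List.take_left
    have hfull : pre ++ c :: cs = (pre ++ [c]) ++ cs := by simp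
    have hlen : ((pre ++ [c]).length : Int) = (pre.length : Int) + 1 := by
      simp
    rw [PySem.List.enumerate_cons, newCells]
    by_cases hc : c ∈ pre
    · have hmem : c ∈ PySem.Set.ofList pre := (PySem.Set.mem_ofList pre c).2 hc
      rw [if_pos hmem]
      have hcont : (pre.contains c) = true := by simpa using hc
      have hof : PySem.Set.ofList (pre ++ [c]) = PySem.Set.ofList pre := by
        rw [PySem.Set.ofList_append_singleton, PySem.Set.add_of_mem hmem]
      have hih := ih (pre ++ [c])
      rw [hof, hlen] at hih
      rw [List.filter_cons, hslice]
      simp only [hcont, Bool.not_true, Bool.false_eq_true, if_false]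
      rw [hfull]
      exact hih
    · have hmem : c ∉ PySem.Set.ofList pre := fun h => hc ((PySem.Set.mem_ofList pre c).1 h)
      rw [if_neg hmem]
      have hcont : (pre.contains c) = false := by simpa using hc
      have hof : PySem.Set.ofList (pre ++ [c]) = PySem.Set.ofList pre ++ [c] := by
        rw [PySem.Set.ofList_append_singleton, PySem.Set.add_of_not_mem hmem]
      have hih := ih (pre ++ [c])
      rw [hof, hlen] at hih
      rw [newCells_congr cs (PySem.Set.ofList pre ++ [c]) (c :: PySem.Set.ofList pre)
        (by intro x; simp; tauto)] at hih
      simp only [List.length_append, List.length_cons, List.length_nil, Nat.cast_add,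
        Nat.cast_one, zero_add] at hih
      rw [List.filter_cons, hslice]
      simp only [hcont, Bool.not_false, if_true]
      rw [List.map_cons, hslice, PySem.List.enumerate_cons, List.map_cons]
      rw [hfull]
      rw [hih]

-- ===== VERDICT (by name: the statement is the Claim_ definition above) =====
theorem create_cell_numbers_py_spec : Claim_equal_create_cell_numbers_py := by
  intro pw _
  show create_cell_numbers_py pw = create_cell_numbers_py_alt pw
  unfold create_cell_numbers_py create_cell_numbers_py_alt
  simp only []
  rw [show (List.foldl
        (fun (st : PySem.Dict (Int × Int) Int × Int) (y : String × Int × Int × String) =>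
          if st.1.contains (y.2.1, y.2.2.1) then st else (st.1.insert (y.2.1, y.2.2.1) st.2, st.2 + 1))
        (PySem.Dict.empty, 1) pw)
      = (List.foldl
        (fun (st : PySem.Dict (Int × Int) Int × Int) c =>
          if st.1.contains c then st else (st.1.insert c st.2, st.2 + 1))
        (PySem.Dict.empty, 1) (pw.map (fun y => (y.2.1, y.2.2.1))))
      from by rw [List.foldl_map]]
  rw [show (PySem.Dict.empty : PySem.Dict (Int × Int) Int) = PySem.Dict.mk [] from rfl]
  rw [loop_invariant]
  have hB := alt_invariant (pw.map (fun y => (y.2.1, y.2.2.1))) []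
  simp only [List.nil_append, List.length_nil, Nat.cast_zero] at hB
  rw [hB]
  simp [PySem.Dict.keys, Function.comp, PySem.Set.ofList]
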